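-- pv_equiv track=rewrite | github.com/ClaudioSMV/AzimuthalAnalysis | macros/lib/lib_cuts.py | extract_indices_dict
-- ===== SOURCE A (Python) =====
-- def extract_indices_dict(bincode):
-- # Create dictionary with the indices associated to each variable in bincode
--     result = {}
--     current_char = ""
--     current_number = ""
--     for char in bincode:
--         if char.isdigit():
--             current_number += char
--         else:
--             if current_char and current_number:
--                 result[current_char] = int(current_number)
--             current_char = char
--             current_number = ""
--     if current_char and current_number:
--         result[current_char] = int(current_number)
--
--     return result
-- ===== SOURCE B (Python) =====
-- def extract_indices_dict(bincode):
--     # Lookahead scan: a match starts at a non-digit followed by a digit run;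
--     # consume the whole run at once instead of keeping current_char/current_number state.
--     result = {}
--     i, n = 0, len(bincode)
--     while i + 1 < n:
--         if not bincode[i].isdigit() and bincode[i + 1].isdigit():
--             j = i + 1
--             while j < n and bincode[j].isdigit():
--                 j += 1
--             result[bincode[i]] = int(bincode[i + 1:j])
--             i = j
--         else:
--             i += 1
--     return result
-- ===== Notes on version B (the rewrite author's own statement) =====
-- stated objective: alternative
-- what changed: Replaced the stateful current_char/current_number accumulator loop by a lookahead scan that finds each non-digit followed by a digit run, consumes the whole run at once and records the pair directly.
import Mathlib
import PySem

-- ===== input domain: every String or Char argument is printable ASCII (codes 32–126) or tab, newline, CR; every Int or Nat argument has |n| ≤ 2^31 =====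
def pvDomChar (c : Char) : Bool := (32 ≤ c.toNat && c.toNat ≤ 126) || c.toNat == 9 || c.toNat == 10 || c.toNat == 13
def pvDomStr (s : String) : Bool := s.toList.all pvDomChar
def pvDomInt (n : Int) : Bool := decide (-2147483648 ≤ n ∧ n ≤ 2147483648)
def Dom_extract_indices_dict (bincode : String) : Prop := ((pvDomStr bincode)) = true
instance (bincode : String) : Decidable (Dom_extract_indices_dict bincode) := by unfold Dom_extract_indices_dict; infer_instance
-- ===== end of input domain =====

-- B replaces A's stateful current_char/current_number loop by a lookahead scan that finds each
-- non-digit char followed by a digit run and records the pair directly (alternative decomposition).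


-- int(s) applied to a nonempty run of ASCII digits: always succeeds, so the getD 0 default is never used
def pvIntOf (cs : List Char) : Int := (PySem.Int.ofChars? cs).getD 0

-- ===== PORT A =====
-- state = (result, current_char, current_number); the for-loop is the foldl, then the final flush
def extract_indices_dict (bincode : String) : List (String × Int) :=
  let fin := bincode.toList.foldl
    (fun (st : PySem.Dict String Int × String × List Char) char =>
      if PySem.Chars.isdigit char then
        (st.1, st.2.1, st.2.2 ++ [char])
      else
        let result := if st.2.1 ≠ "" ∧ st.2.2 ≠ [] then st.1.insert st.2.1 (pvIntOf st.2.2) else st.1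
        (result, String.ofList [char], ([] : List Char)))
    (PySem.Dict.empty, "", ([] : List Char))
  (if fin.2.1 ≠ "" ∧ fin.2.2 ≠ [] then fin.1.insert fin.2.1 (pvIntOf fin.2.2) else fin.1).items

-- ===== PORT B =====
-- the outer while-loop with lookahead: a match is a non-digit char whose successor is a digit;
-- the inner while-loop consuming the digit run is the takeWhile/dropWhile pair
def pvFindPairs : List Char → List (String × List Char)
  | [] => []
  | c :: rest =>
    if ¬ PySem.Chars.isdigit c ∧ (rest.head?.map PySem.Chars.isdigit).getD false then
      (String.ofList [c], rest.takeWhile PySem.Chars.isdigit) ::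
        pvFindPairs (rest.dropWhile PySem.Chars.isdigit)
    else pvFindPairs rest
  termination_by cs => cs.length
  decreasing_by
  · simpa using Nat.lt_succ_of_le (List.length_dropWhile_le _ _)
  · simp

def extract_indices_dict_alt (bincode : String) : List (String × Int) :=
  ((pvFindPairs bincode.toList).foldl
    (fun (d : PySem.Dict String Int) p => d.insert p.1 (pvIntOf p.2)) PySem.Dict.empty).items

-- ===== PRECONDITION & SPEC =====
def Spec_extract_indices_dict (bincode : String) (out : List (String × Int)) : Prop := out = extract_indices_dict_alt bincode
instance (bincode : String) (out : List (String × Int)) : Decidable (Spec_extract_indices_dict bincode out) := by unfold Spec_extract_indices_dict; infer_instance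

-- ===== CLAIM (what is proved, stated in full; the proofs are below) =====
def Claim_equal_extract_indices_dict : Prop := ∀ (bincode : String), Dom_extract_indices_dict bincode → Spec_extract_indices_dict bincode (extract_indices_dict bincode)

-- ===== LEMMAS AND PROOFS =====

-- abbreviations for the proof
def pvStep (st : PySem.Dict String Int × String × List Char) (char : Char) :
    PySem.Dict String Int × String × List Char :=
  if PySem.Chars.isdigit char then
    (st.1, st.2.1, st.2.2 ++ [char])
  else
    let result := if st.2.1 ≠ "" ∧ st.2.2 ≠ [] then st.1.insert st.2.1 (pvIntOf st.2.2) else st.1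
    (result, String.ofList [char], ([] : List Char))

def pvRunA (d : PySem.Dict String Int) (cur : String) (num : List Char) (cs : List Char) :
    PySem.Dict String Int :=
  let fin := cs.foldl pvStep (d, cur, num)
  if fin.2.1 ≠ "" ∧ fin.2.2 ≠ [] then fin.1.insert fin.2.1 (pvIntOf fin.2.2) else fin.1

def pvDictOf (d : PySem.Dict String Int) (ps : List (String × List Char)) : PySem.Dict String Int :=
  ps.foldl (fun d p => d.insert p.1 (pvIntOf p.2)) d

-- the pending-state invariant: a non-digit char c has just been read, num digits accumulated after it
theorem pvDictOf_cons (d : PySem.Dict String Int) (p : String × List Char)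
    (ps : List (String × List Char)) :
    pvDictOf d (p :: ps) = pvDictOf (d.insert p.1 (pvIntOf p.2)) ps := rfl

theorem pvPending (cs : List Char) : ∀ (d : PySem.Dict String Int) (c : Char) (num : List Char),
    PySem.Chars.isdigit c = false →
    pvRunA d (String.ofList [c]) num cs =
      (if num = [] then pvDictOf d (pvFindPairs (c :: cs))
       else pvDictOf (d.insert (String.ofList [c]) (pvIntOf (num ++ cs.takeWhile PySem.Chars.isdigit)))
              (pvFindPairs (cs.dropWhile PySem.Chars.isdigit))) := by
  induction cs with
  | nil =>
    intro d c num hc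
    simp only [pvRunA, List.foldl_nil, pvFindPairs, List.takeWhile_nil, List.dropWhile_nil,
      List.append_nil]
    by_cases hnum : num = []
    · simp [hnum, pvDictOf, hc]
    · simp [hnum, pvDictOf, ← String.toList_inj]
  | cons x cs ih =>
    intro d c num hc
    have hcne : String.ofList [c] ≠ "" := by simp [← String.toList_inj]
    by_cases hx : PySem.Chars.isdigit x = true
    · have hstep : pvRunA d (String.ofList [c]) num (x :: cs)
          = pvRunA d (String.ofList [c]) (num ++ [x]) cs := by
        simp [pvRunA, pvStep, hx]
      rw [hstep, ih d c (num ++ [x]) hc]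
      by_cases hnum : num = []
      · subst hnum
        simp [pvFindPairs, hc, hx, pvDictOf_cons]
      · simp [hnum, hx]
    · have hx' : PySem.Chars.isdigit x = false := by simpa using hx
      by_cases hnum : num = []
      · subst hnum
        have hstep : pvRunA d (String.ofList [c]) [] (x :: cs)
            = pvRunA d (String.ofList [x]) [] cs := by
          simp [pvRunA, pvStep, hx']
        rw [hstep, ih d x [] hx']
        have hfp : pvFindPairs (c :: x :: cs) = pvFindPairs (x :: cs) := by
          simp [pvFindPairs, hx']
        simp [hfp]
      · have hstep : pvRunA d (String.ofList [c]) num (x :: cs)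
            = pvRunA (d.insert (String.ofList [c]) (pvIntOf num)) (String.ofList [x]) [] cs := by
          simp [pvRunA, pvStep, hx', hcne, hnum]
        rw [hstep, ih _ x [] hx']
        simp [hnum, hx']

-- empty pending char: nothing is ever flushed until a non-digit arrives
theorem pvInit (cs : List Char) : ∀ (d : PySem.Dict String Int) (num : List Char),
    pvRunA d "" num cs = pvDictOf d (pvFindPairs cs) := by
  induction cs with
  | nil => intro d num; simp [pvRunA, pvDictOf, pvFindPairs]
  | cons x cs ih =>
    intro d num
    by_cases hx : PySem.Chars.isdigit x = true
    · have h1 : pvRunA d "" num (x :: cs) = pvRunA d "" (num ++ [x]) cs := by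
        simp [pvRunA, pvStep, hx]
      rw [h1, ih]
      have h2 : pvFindPairs (x :: cs) = pvFindPairs cs := by simp [pvFindPairs, hx]
      rw [h2]
    · have hx' : PySem.Chars.isdigit x = false := by simpa using hx
      have h1 : pvRunA d "" num (x :: cs) = pvRunA d (String.ofList [x]) [] cs := by
        simp [pvRunA, pvStep, hx']
      rw [h1, pvPending cs d x [] hx']
      simp [pvFindPairs]

-- ===== VERDICT (by name: the statement is the Claim_ definition above) =====
theorem extract_indices_dict_spec : Claim_equal_extract_indices_dict := by
  intro bincode _
  unfold Spec_extract_indices_dict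
  have h1 : extract_indices_dict bincode
      = (pvRunA PySem.Dict.empty "" [] bincode.toList).items := rfl
  have h2 : extract_indices_dict_alt bincode
      = (pvDictOf PySem.Dict.empty (pvFindPairs bincode.toList)).items := rfl
  rw [h1, h2, pvInit]
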